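-- pv_equiv track=rewrite | github.com/FrameworkComputer/linux-docs | MeshAnalyzer/files/mesh_venn_calculator.py | _position_four_nodes
-- ===== SOURCE A (Python) =====
-- from typing import Dict, List, Tuple, Optional
--
-- def _position_four_nodes(nodes_data: List[Dict]) -> List[Dict]:
--     """Position four nodes in diamond/square formation"""
--     # Sort by signal strength
--     sorted_indices = sorted(range(len(nodes_data)), key=lambda i: nodes_data[i]['signal'], reverse=True)
--
--     # Diamond positions for maximum overlaps
--     base_positions = [
--         {'x': 40, 'y': 35},   # Top-left
--         {'x': 60, 'y': 35},   # Top-right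
--         {'x': 35, 'y': 55},   # Bottom-left
--         {'x': 65, 'y': 55}    # Bottom-right
--     ]
--
--     positions = [None] * 4
--     for i, orig_idx in enumerate(sorted_indices):
--         positions[orig_idx] = base_positions[i]
--
--     return positions
-- ===== SOURCE B (Python) =====
-- def _position_four_nodes(nodes_data):
--     """Position four nodes in diamond/square formation (sort-free, comprehension variant)."""
--     base_positions = [
--         {'x': 40, 'y': 35},   # Top-left
--         {'x': 60, 'y': 35},   # Top-right
--         {'x': 35, 'y': 55},   # Bottom-left
--         {'x': 65, 'y': 55}    # Bottom-right
--     ]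
--     n = len(nodes_data)
--
--     def rank(i):
--         # position of node i in the stable descending-by-signal order
--         s = nodes_data[i]['signal']
--         return sum(1 for j in range(n)
--                    if nodes_data[j]['signal'] > s
--                    or (nodes_data[j]['signal'] == s and j < i))
--
--     return [base_positions[rank(i)] if i < n else None for i in range(4)]
-- ===== Notes on version B (the rewrite author's own statement) =====
-- stated objective: alternative
-- what changed: B never sorts and never mutates a positions array: it builds the 4-slot result directly by a comprehension over slot indices, computing each node's slot as its rank counted by comparisons (strictly greater signal, or equal signal with smaller index, mirroring the stable descending sort).
import Mathlib
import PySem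

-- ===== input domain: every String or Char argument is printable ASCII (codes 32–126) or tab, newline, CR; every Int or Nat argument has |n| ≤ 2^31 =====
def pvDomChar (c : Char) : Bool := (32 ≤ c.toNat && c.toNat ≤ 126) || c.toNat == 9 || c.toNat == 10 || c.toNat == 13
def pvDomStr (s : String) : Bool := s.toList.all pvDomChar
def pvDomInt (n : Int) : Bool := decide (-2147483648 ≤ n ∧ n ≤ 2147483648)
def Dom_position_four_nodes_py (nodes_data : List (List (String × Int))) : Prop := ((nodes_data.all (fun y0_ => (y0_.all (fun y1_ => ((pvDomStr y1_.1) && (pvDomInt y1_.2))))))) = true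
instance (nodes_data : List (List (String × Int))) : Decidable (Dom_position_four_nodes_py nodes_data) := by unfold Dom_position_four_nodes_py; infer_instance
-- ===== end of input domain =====

-- B builds the 4-slot result directly by mapping over slot indices, each node's slot being its
-- comparison-counted rank; no sort, no array mutation. Same result on Pre_.

-- ===== PORT A =====
-- nodes_data[i]['signal'] / node['signal'] (KeyError excluded by Pre_; total form uses default 0)
def pvSig (nd : List (String × Int)) : Int := (PySem.Dict.mk nd).getD "signal" 0

def position_four_nodes_py (nodes_data : List (List (String × Int))) : List (Option (List (String × Int))) :=
  -- sorted_indices = sorted(range(len(nodes_data)), key=lambda i: nodes_data[i]['signal'], reverse=True)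
  let sortedIndices : List Int :=
    PySem.List.sorted (PySem.List.pyRange 0 (nodes_data.length : Int) 1)
      (fun i => pvSig (PySem.List.pyGetD nodes_data i [])) true
  let basePositions : List (List (String × Int)) :=
    [[("x", 40), ("y", 35)], [("x", 60), ("y", 35)], [("x", 35), ("y", 55)], [("x", 65), ("y", 55)]]
  let positions : List (Option (List (String × Int))) := [none, none, none, none]
  -- for i, orig_idx in enumerate(sorted_indices): positions[orig_idx] = base_positions[i]
  (PySem.List.enumerate sortedIndices).foldl
    (fun pos p => PySem.List.pySetD pos p.2 (some (PySem.List.pyGetD basePositions p.1 [])))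
    positions

-- ===== PORT B =====
-- helper rank(i) of Source B: sum(1 for j in range(n) if …) ported as a count over range(n)
def pvRankB (nodes_data : List (List (String × Int))) (i : Int) : Int :=
  let s := pvSig (PySem.List.pyGetD nodes_data i [])
  ((PySem.List.pyRange 0 (nodes_data.length : Int) 1).countP
    (fun j => decide (pvSig (PySem.List.pyGetD nodes_data j []) > s) ||
              (decide (pvSig (PySem.List.pyGetD nodes_data j []) = s) && decide (j < i))) : Int)

def position_four_nodes_py_alt (nodes_data : List (List (String × Int))) : List (Option (List (String × Int))) :=
  let basePositions : List (List (String × Int)) :=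
    [[("x", 40), ("y", 35)], [("x", 60), ("y", 35)], [("x", 35), ("y", 55)], [("x", 65), ("y", 55)]]
  let n : Int := nodes_data.length
  -- [base_positions[rank(i)] if i < n else None for i in range(4)]
  (PySem.List.pyRange 0 4 1).map (fun i =>
    if i < n then some (PySem.List.pyGetD basePositions (pvRankB nodes_data i) []) else none)

-- ===== PRECONDITION & SPEC =====
-- Pre_ excludes exactly the raising inputs: more than four nodes (IndexError on positions[orig_idx])
-- and nodes without a 'signal' key (KeyError in the sort key).
def Pre_position_four_nodes_py (nodes_data : List (List (String × Int))) : Prop :=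
  nodes_data.length ≤ 4 ∧ ∀ nd ∈ nodes_data, (PySem.Dict.mk nd).contains "signal" = true
instance (nodes_data : List (List (String × Int))) : Decidable (Pre_position_four_nodes_py nodes_data) := by
  unfold Pre_position_four_nodes_py; infer_instance

def pvWitness_position_four_nodes_py : (List (List (String × Int))) :=
  [[("signal", 5)], [("signal", 7)], [("signal", 5)]]

def Spec_position_four_nodes_py (nodes_data : List (List (String × Int))) (out : List (Option (List (String × Int)))) : Prop := out = position_four_nodes_py_alt nodes_data
instance (nodes_data : List (List (String × Int))) (out : List (Option (List (String × Int)))) : Decidable (Spec_position_four_nodes_py nodes_data out) := by unfold Spec_position_four_nodes_py; infer_instance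

-- ===== CLAIM (what is proved, stated in full; the proofs are below) =====
def Claim_equal_position_four_nodes_py : Prop := ∀ (nodes_data : List (List (String × Int))), Dom_position_four_nodes_py nodes_data → Pre_position_four_nodes_py nodes_data → Spec_position_four_nodes_py nodes_data (position_four_nodes_py nodes_data)

-- ===== LEMMAS AND PROOFS =====

-- abbreviations used only by the proofs
def pvKey (nodes_data : List (List (String × Int))) (i : Int) : Int :=
  pvSig (PySem.List.pyGetD nodes_data i [])

def pvBase : List (List (String × Int)) :=
  [[("x", 40), ("y", 35)], [("x", 60), ("y", 35)], [("x", 35), ("y", 55)], [("x", 65), ("y", 55)]]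

-- the comparison A's stable descending insertion sort makes, and the rank condition B counts
def pvRel (k : Int → Int) (a b : Int) : Prop := k b < k a ∨ (k b = k a ∧ a < b)

def pvCondB (k : Int → Int) (t j : Int) : Bool :=
  decide (k t < k j) || (decide (k j = k t) && decide (j < t))

-- insertBy splits at the first element the comparator fires on
lemma pvInsertBy_split {α : Type} (before : α → α → Bool) (x : α) (ys : List α) :
    PySem.List.insertBy before x ys
      = ys.takeWhile (fun y => !before x y) ++ x :: ys.dropWhile (fun y => !before x y) := by
  induction ys with
  | nil => simp [PySem.List.insertBy]
  | cons y ys ih =>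
    by_cases h : before x y
    · simp [PySem.List.insertBy, h]
    · simp [PySem.List.insertBy, h, ih]

-- in a Pairwise-sorted list a downward-closed predicate counts exactly its takeWhile prefix
lemma pvCountP_eq_len_takeWhile {α : Type} (p : α → Bool) (rel : α → α → Prop) (l : List α)
    (hp : l.Pairwise rel) (hmono : ∀ a b, rel a b → p b = true → p a = true) :
    l.countP p = (l.takeWhile p).length := by
  induction l with
  | nil => simp
  | cons a l ih =>
    rcases List.pairwise_cons.mp hp with ⟨ha, hl⟩
    by_cases pa : p a = true
    · simp [pa, ih hl]
    · have hz : l.countP p = 0 := by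
        refine List.countP_eq_zero.mpr ?_
        intro b hb hpb
        exact pa (hmono a b (ha b hb) hpb)
      simp [pa, hz]

lemma pvMem_dropWhile_not {α : Type} (p : α → Bool) (rel : α → α → Prop) (l : List α)
    (hp : l.Pairwise rel) (hmono : ∀ a b, rel a b → p b = true → p a = true) :
    ∀ b ∈ l.dropWhile p, p b = false := by
  induction l with
  | nil => simp
  | cons a l ih =>
    rcases List.pairwise_cons.mp hp with ⟨ha, hl⟩
    by_cases pa : p a = true
    · simpa [List.dropWhile_cons, pa] using ih hl
    · intro b hb
      rw [List.dropWhile_cons_of_neg (by simp_all)] at hb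
      rcases List.mem_cons.mp hb with rfl | hb
      · simpa using pa
      · by_contra hc
        simp only [Bool.not_eq_false] at hc
        exact pa (hmono a b (ha b hb) hc)

lemma pvIdxOf?_append_right {α : Type} [BEq α] [LawfulBEq α] (pre suf : List α) (v : α)
    (h : v ∉ pre) : List.idxOf? v (pre ++ suf) = (List.idxOf? v suf).map (· + pre.length) := by
  induction pre with
  | nil => simp
  | cons a pre ih =>
    have hne : v ≠ a := by rintro rfl; exact h List.mem_cons_self
    have hv : v ∉ pre := fun hv => h (List.mem_cons_of_mem _ hv)
    simp only [List.cons_append, List.idxOf?_cons, beq_iff_eq, Ne.symm hne, if_false, ih hv]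
    cases List.idxOf? v suf
    · simp
    · simp
      omega

-- the insertion sort A builds over the index list [0, …, m-1], and B's rank count over it
def pvSorted (k : Int → Int) (m : Nat) : List Int :=
  List.foldl (fun acc x => PySem.List.insertBy (fun a b => decide (k b < k a)) x acc) []
    (PySem.List.pyRange 0 (m : Int) 1)

def pvCnt (k : Int → Int) (m : Nat) (t : Int) : Nat :=
  (PySem.List.pyRange 0 (m : Int) 1).countP (pvCondB k t)

lemma pvIdxOf?_append_left {α : Type} [BEq α] [LawfulBEq α] (pre suf : List α) (v : α)
    (h : v ∈ pre) : List.idxOf? v (pre ++ suf) = List.idxOf? v pre := by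
  have := PySem.List.index?_append_of_mem (l := pre) suf (v := v) h
  simpa [PySem.List.index?_eq_idxOf?] using this

lemma pvRangeNodup (m : Nat) : (PySem.List.pyRange 0 (m : Int) 1).Nodup := by
  rw [PySem.List.pyRange_zero_natCast]
  exact (List.nodup_range).map (fun a b => by omega)

-- the three invariants of A's insertion sort of the index list [0, …, m-1]
lemma pvSortInv (k : Int → Int) (m : Nat) :
    (pvSorted k m).Perm (PySem.List.pyRange 0 (m : Int) 1) ∧
    (pvSorted k m).Pairwise (pvRel k) ∧
    (∀ t : Int, t ∈ PySem.List.pyRange 0 (m : Int) 1 →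
      List.idxOf? t (pvSorted k m) = some (pvCnt k m t)) := by
  induction m with
  | zero =>
    refine ⟨?_, ?_, ?_⟩ <;>
      simp [pvSorted, pvCnt]
  | succ m IH =>
    obtain ⟨IH1, IH2, IH3⟩ := IH
    have hcast : ((m + 1 : Nat) : Int) = (m : Int) + 1 := by push_cast; ring
    have hR' : PySem.List.pyRange 0 ((m + 1 : Nat) : Int) 1
        = PySem.List.pyRange 0 (m : Int) 1 ++ [(m : Int)] := by
      rw [hcast, PySem.List.pyRange_one_succ_right (by omega)]
    have hS' : pvSorted k (m + 1)
        = PySem.List.insertBy (fun a b => decide (k b < k a)) (m : Int) (pvSorted k m) := by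
      unfold pvSorted
      rw [hR', List.foldl_append, List.foldl_cons, List.foldl_nil]
    have hsplit := pvInsertBy_split (fun a b => decide (k b < k a)) ((m : Int)) (pvSorted k m)
    have hmemSm : ∀ y ∈ pvSorted k m, 0 ≤ y ∧ y < (m : Int) := by
      intro y hy
      have : y ∈ PySem.List.pyRange 0 (m : Int) 1 := (IH1.mem_iff).mp hy
      exact PySem.List.mem_pyRange_one.mp this
    have hndSm : (pvSorted k m).Nodup := (IH1.nodup_iff).mpr (pvRangeNodup m)
    have hmono : ∀ a b : Int, pvRel k a b →
        (!decide (k b < k ((m : Int)))) = true → (!decide (k a < k ((m : Int)))) = true := by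
      intro a b hab hb
      simp only [Bool.not_eq_eq_eq_not, Bool.not_true, decide_eq_false_iff_not] at hb ⊢
      rcases hab with h | ⟨h, _⟩ <;> omega
    have hUV := List.takeWhile_append_dropWhile
      (p := fun y => !decide (k y < k ((m : Int)))) (l := pvSorted k m)
    have hVfalse : ∀ v ∈ (pvSorted k m).dropWhile (fun y => !decide (k y < k ((m : Int)))),
        k v < k ((m : Int)) := by
      intro v hv
      have := pvMem_dropWhile_not (fun y => !decide (k y < k ((m : Int)))) (pvRel k)
        (pvSorted k m) IH2 (fun a b hab hb => hmono a b hab hb) v hv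
      simpa using this
    have hUtrue : ∀ u₀ ∈ (pvSorted k m).takeWhile (fun y => !decide (k y < k ((m : Int)))),
        ¬ (k u₀ < k ((m : Int))) := by
      intro u₀ hu₀
      have := List.mem_takeWhile_imp hu₀
      simpa using this
    have hUsub : ∀ u₀ ∈ (pvSorted k m).takeWhile (fun y => !decide (k y < k ((m : Int)))),
        u₀ ∈ pvSorted k m := fun u₀ hu₀ => (List.takeWhile_sublist _).mem hu₀
    have hVsub : ∀ v ∈ (pvSorted k m).dropWhile (fun y => !decide (k y < k ((m : Int)))),
        v ∈ pvSorted k m := fun v hv => (List.dropWhile_sublist _).mem hv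
    have hmnotin : ((m : Int)) ∉ pvSorted k m := by
      intro hm
      exact absurd (hmemSm _ hm).2 (by omega)
    refine ⟨?_, ?_, ?_⟩
    · -- permutation
      rw [hS', hsplit, hR']
      refine List.Perm.trans List.perm_middle ?_
      rw [hUV]
      exact ((IH1.cons _)).trans (List.perm_append_singleton _ _).symm
    · -- pairwise
      rw [hS', hsplit]
      rw [List.pairwise_append]
      have hpairUV : ((pvSorted k m).takeWhile (fun y => !decide (k y < k ((m : Int))))
            ++ (pvSorted k m).dropWhile (fun y => !decide (k y < k ((m : Int))))).Pairwise (pvRel k) := by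
        rw [hUV]; exact IH2
      rw [List.pairwise_append] at hpairUV
      refine ⟨hpairUV.1, ?_, ?_⟩
      · refine List.pairwise_cons.mpr ⟨?_, hpairUV.2.1⟩
        intro v hv
        exact Or.inl (hVfalse v hv)
      · intro u₀ hu₀ b hb
        rcases List.mem_cons.mp hb with rfl | hbV
        · rcases lt_or_eq_of_le (not_lt.mp (hUtrue u₀ hu₀)) with h | h
          · exact Or.inl h
          · exact Or.inr ⟨h, (hmemSm u₀ (hUsub u₀ hu₀)).2⟩
        · exact hpairUV.2.2 u₀ hu₀ b hbV
    · -- index characterisation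
      intro t ht
      rw [hR'] at ht
      have hcntsucc : pvCnt k (m + 1) t
          = pvCnt k m t + (if pvCondB k t ((m : Int)) then 1 else 0) := by
        unfold pvCnt
        rw [hR', List.countP_append]
        simp [List.countP_cons]
      rcases List.mem_append.mp ht with htR | htm
      · -- an old index t < m
        have htm' : t < (m : Int) ∧ 0 ≤ t := by
          have := PySem.List.mem_pyRange_one.mp htR
          exact ⟨this.2, this.1⟩
        have hold := IH3 t htR
        rw [hS', hsplit]
        by_cases htU : t ∈ (pvSorted k m).takeWhile (fun y => !decide (k y < k ((m : Int))))
        · -- t keeps its position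
          have hcond : pvCondB k t ((m : Int)) = false := by
            have := hUtrue t htU
            simp only [pvCondB]
            simp only [Bool.or_eq_false_iff, decide_eq_false_iff_not, Bool.and_eq_false_iff]
            exact ⟨by omega, Or.inr (by simp; omega)⟩
          rw [pvIdxOf?_append_left _ _ _ htU]
          rw [← pvIdxOf?_append_left _ ((pvSorted k m).dropWhile
              (fun y => !decide (k y < k ((m : Int))))) _ htU, hUV, hold]
          rw [hcntsucc, hcond]
          simp
        · -- t shifts one to the right
          have htV : t ∈ (pvSorted k m).dropWhile (fun y => !decide (k y < k ((m : Int)))) := by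
            have : t ∈ pvSorted k m := (IH1.mem_iff).mpr htR
            rw [← hUV] at this
            rcases List.mem_append.mp this with h | h
            · exact absurd h htU
            · exact h
          have hcond : pvCondB k t ((m : Int)) = true := by
            have := hVfalse t htV
            simp only [pvCondB]
            simp only [Bool.or_eq_true_iff, decide_eq_true_eq]
            exact Or.inl this
          have htne : t ≠ ((m : Int)) := by omega
          rw [pvIdxOf?_append_right _ _ _ htU]
          have hVidx : List.idxOf? t ((m : Int) :: (pvSorted k m).dropWhile
              (fun y => !decide (k y < k ((m : Int)))))
              = (List.idxOf? t ((pvSorted k m).dropWhile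
                  (fun y => !decide (k y < k ((m : Int)))))).map (· + 1) := by
            simp [List.idxOf?_cons, Ne.symm htne]
          rw [hVidx]
          have hold' : List.idxOf? t ((pvSorted k m).takeWhile (fun y => !decide (k y < k ((m : Int))))
              ++ (pvSorted k m).dropWhile (fun y => !decide (k y < k ((m : Int))))) = some (pvCnt k m t) := by
            rw [hUV]; exact hold
          rw [pvIdxOf?_append_right _ _ _ htU] at hold'
          cases hdix : List.idxOf? t ((pvSorted k m).dropWhile
              (fun y => !decide (k y < k ((m : Int))))) with
          | none => rw [hdix] at hold'; simp at hold'
          | some i =>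
            rw [hdix] at hold'
            simp only [Option.map_some, Option.some_inj] at hold' ⊢
            rw [hcntsucc, hcond]
            simp only [if_true]
            omega
      · -- the new index t = m
        have htm' : t = (m : Int) := by simpa using htm
        subst htm'
        have hmnotinU : ((m : Int)) ∉ (pvSorted k m).takeWhile
            (fun y => !decide (k y < k ((m : Int)))) := fun h => hmnotin (hUsub _ h)
        rw [hS', hsplit]
        rw [pvIdxOf?_append_right _ _ _ hmnotinU]
        have h0 : List.idxOf? ((m : Int)) ((m : Int) :: (pvSorted k m).dropWhile
            (fun y => !decide (k y < k ((m : Int))))) = some 0 := by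
          simp [List.idxOf?_cons]
        rw [h0]
        have hcondmm : pvCondB k ((m : Int)) ((m : Int)) = false := by simp [pvCondB]
        have hcntq : pvCnt k m ((m : Int))
            = List.countP (fun y => !decide (k y < k ((m : Int))))
                (PySem.List.pyRange 0 (m : Int) 1) := by
          unfold pvCnt
          refine List.countP_congr ?_
          intro j hj
          have hj' := PySem.List.mem_pyRange_one.mp hj
          simp only [pvCondB, Bool.or_eq_true_iff, Bool.and_eq_true_iff, decide_eq_true_eq,
            Bool.not_eq_true', decide_eq_false_iff_not]
          omega
        have hlenU : List.countP (fun y => !decide (k y < k ((m : Int)))) (pvSorted k m)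
            = ((pvSorted k m).takeWhile (fun y => !decide (k y < k ((m : Int))))).length :=
          pvCountP_eq_len_takeWhile _ (pvRel k) _ IH2 hmono
        have hfin : pvCnt k (m + 1) ((m : Int))
            = ((pvSorted k m).takeWhile (fun y => !decide (k y < k ((m : Int))))).length := by
          rw [hcntsucc, hcondmm]
          simp only [Bool.false_eq_true, if_false, add_zero]
          rw [hcntq, ← List.Perm.countP_eq _ IH1, hlenU]
        rw [hfin]
        simp

-- A's scatter loop, elementwise
lemma pvFoldScatter (g : Int → Option (List (String × Int))) (S : List Int) (j : Int)
    (init : List (Option (List (String × Int))))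
    (hnd : S.Nodup) (hmem : ∀ t ∈ S, 0 ≤ t ∧ t < (init.length : Int)) (u : Nat) :
    (List.foldl (fun pos p => PySem.List.pySetD pos p.2 (g p.1)) init
        (PySem.List.enumerate S j))[u]? =
      (match List.idxOf? ((u : Int)) S with
       | some i => some (g (j + i))
       | none => init[u]?) := by
  induction S generalizing j init with
  | nil => simp [PySem.List.enumerate]
  | cons s S ih =>
    rcases hmem s List.mem_cons_self with ⟨hs0, hslen⟩
    have hsnat : s = ((s.toNat : Nat) : Int) := by omega
    rcases List.nodup_cons.mp hnd with ⟨hsS, hndS⟩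
    rw [PySem.List.enumerate_cons, List.foldl_cons]
    have hlen' : (PySem.List.pySetD init s (g j)).length = init.length := by
      rw [hsnat, PySem.List.pySetD_natCast, List.length_set]
    rw [ih (j + 1) _ hndS (by intro t ht; rw [hlen']; exact hmem t (List.mem_cons_of_mem _ ht))]
    by_cases hu : s = (u : Int)
    · have hidx : List.idxOf? ((u : Int)) (s :: S) = some 0 := by
        simp [List.idxOf?_cons, hu]
      have hnotmem : List.idxOf? ((u : Int)) S = none := by
        rw [List.idxOf?_eq_none_iff]
        rw [hu] at hsS; exact hsS
      rw [hidx, hnotmem]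
      have hut : s.toNat = u := by omega
      rw [hsnat, PySem.List.pySetD_natCast, hut]
      simp only [List.getElem?_set_self (by omega : u < init.length), Nat.cast_zero, add_zero]
    · have hidx : List.idxOf? ((u : Int)) (s :: S)
          = (List.idxOf? ((u : Int)) S).map (· + 1) := by
        simp [List.idxOf?_cons, hu]
      rw [hidx]
      have hset : (PySem.List.pySetD init s (g j))[u]? = init[u]? := by
        rw [hsnat, PySem.List.pySetD_natCast]
        exact List.getElem?_set_ne (by omega)
      cases hfind : List.idxOf? ((u : Int)) S with
      | none => simp [hset]
      | some i =>
        simp only [Option.map_some]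
        have : (j + 1) + (i : Int) = j + ((i : Nat) + 1 : Nat) := by push_cast; ring
        rw [this]

-- elementwise description of A's output
lemma pvA_elem (nodes_data : List (List (String × Int))) (hlen : nodes_data.length ≤ 4) (u : Nat) :
    (position_four_nodes_py nodes_data)[u]? =
      (match List.idxOf? ((u : Int)) (pvSorted (pvKey nodes_data) nodes_data.length) with
       | some i => some (some (PySem.List.pyGetD pvBase ((0 : Int) + (i : Int)) []))
       | none => ([none, none, none, none] :
           List (Option (List (String × Int))))[u]?) := by
  have hperm := (pvSortInv (pvKey nodes_data) nodes_data.length).1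
  have hnd : (pvSorted (pvKey nodes_data) nodes_data.length).Nodup :=
    (hperm.nodup_iff).mpr (pvRangeNodup _)
  have hmem : ∀ t ∈ pvSorted (pvKey nodes_data) nodes_data.length,
      0 ≤ t ∧ t < (([none, none, none, none] :
        List (Option (List (String × Int)))).length : Int) := by
    intro t ht
    have := PySem.List.mem_pyRange_one.mp ((hperm.mem_iff).mp ht)
    simp only [List.length_cons, List.length_nil]
    omega
  have h := pvFoldScatter (fun i => some (PySem.List.pyGetD pvBase i []))
    (pvSorted (pvKey nodes_data) nodes_data.length) 0
    [none, none, none, none] hnd hmem u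
  exact h

-- B's rank count equals pvCnt
lemma pvRankB_eq_cnt (nodes_data : List (List (String × Int))) (t : Int) :
    pvRankB nodes_data t = ((pvCnt (pvKey nodes_data) nodes_data.length t : Nat) : Int) := by
  unfold pvRankB pvCnt
  congr 1

-- B's output as a literal 4-element list
def pvG (nodes_data : List (List (String × Int))) (i : Int) : Option (List (String × Int)) :=
  if i < (nodes_data.length : Int) then
    some (PySem.List.pyGetD pvBase (pvRankB nodes_data i) []) else none

lemma pvAlt_eq (nodes_data : List (List (String × Int))) :
    position_four_nodes_py_alt nodes_data
      = [pvG nodes_data 0, pvG nodes_data 1, pvG nodes_data 2, pvG nodes_data 3] := by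
  have hr : PySem.List.pyRange 0 4 1 = [0, 1, 2, 3] := by decide
  simp only [position_four_nodes_py_alt, hr, List.map_cons, List.map_nil, pvG, pvBase]

lemma pvMain (nodes_data : List (List (String × Int))) (hlen : nodes_data.length ≤ 4) :
    position_four_nodes_py nodes_data = position_four_nodes_py_alt nodes_data := by
  have hinv := pvSortInv (pvKey nodes_data) nodes_data.length
  rw [pvAlt_eq]
  apply List.ext_getElem?
  intro u
  rw [pvA_elem nodes_data hlen u]
  by_cases hu4 : u < 4
  · have hB : ([pvG nodes_data 0, pvG nodes_data 1, pvG nodes_data 2, pvG nodes_data 3])[u]?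
        = some (pvG nodes_data ((u : Nat) : Int)) := by
      interval_cases u <;> simp
    rw [hB]
    by_cases hun : u < nodes_data.length
    · have humem : ((u : Int)) ∈ PySem.List.pyRange 0 (nodes_data.length : Int) 1 :=
        PySem.List.mem_pyRange_one.mpr (by constructor <;> omega)
      rw [hinv.2.2 ((u : Int)) humem]
      unfold pvG
      rw [if_pos (by exact_mod_cast hun), pvRankB_eq_cnt]
      simp
    · have hnone : List.idxOf? ((u : Int)) (pvSorted (pvKey nodes_data) nodes_data.length) = none := by
        rw [List.idxOf?_eq_none_iff]
        intro hmem
        have := PySem.List.mem_pyRange_one.mp ((hinv.1.mem_iff).mp hmem)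
        omega
      rw [hnone]
      unfold pvG
      rw [if_neg (by intro h; exact hun (by exact_mod_cast h))]
      interval_cases u <;> rfl
  · have hA : ([none, none, none, none] :
        List (Option (List (String × Int))))[u]? = none := by
      rw [List.getElem?_eq_none]
      simp only [List.length_cons, List.length_nil]; omega
    have hnone : List.idxOf? ((u : Int)) (pvSorted (pvKey nodes_data) nodes_data.length) = none := by
      rw [List.idxOf?_eq_none_iff]
      intro hmem
      have := PySem.List.mem_pyRange_one.mp ((hinv.1.mem_iff).mp hmem)
      omega
    rw [hnone, hA]
    rw [List.getElem?_eq_none]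
    simp only [List.length_cons, List.length_nil]; omega

-- ===== VERDICT (by name: the statement is the Claim_ definition above) =====
theorem position_four_nodes_py_spec : Claim_equal_position_four_nodes_py := by
  intro nodes_data _hdom hpre
  unfold Spec_position_four_nodes_py
  exact pvMain nodes_data hpre.1
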